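-- pv_equiv track=rewrite | github.com/daniel-reich/ubiquitous-fiesta | epMcaSNzBFSF5uB89_12.py | currently_winning
-- ===== SOURCE A (Python) =====
-- def currently_winning(scores):
--   even=0
--   odd=0
--   evenlst=[]
--   oddlst=[]
--   for i in range(len(scores)):
--     if i%2==0:
--       even=even+scores[i]
--       evenlst.append(even)
--     else:
--       odd=odd+scores[i]
--       oddlst.append(odd)
--   lst3=[]
--   for i in range(len(oddlst)):
--     if evenlst[i]>oddlst[i]:
--       lst3.append("Y")
--     elif evenlst[i]==oddlst[i]:
--       lst3.append('T')
--     else: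
--       lst3.append('O')
--   return lst3
-- ===== SOURCE B (Python) =====
-- def currently_winning(scores):
--   even = 0
--   odd = 0
--   out = []
--   for i, x in enumerate(scores):
--     if i % 2 == 0:
--       even += x
--     else:
--       odd += x
--       out.append("Y" if even > odd else "T" if even == odd else "O")
--   return out
-- ===== Notes on version B (the rewrite author's own statement) =====
-- stated objective: simpler
-- what changed: Single pass with two running totals that emits the Y/T/O verdict immediately at each odd index, instead of building two prefix-sum lists in one loop and comparing them index-by-index in a second loop.
import Mathlib
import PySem

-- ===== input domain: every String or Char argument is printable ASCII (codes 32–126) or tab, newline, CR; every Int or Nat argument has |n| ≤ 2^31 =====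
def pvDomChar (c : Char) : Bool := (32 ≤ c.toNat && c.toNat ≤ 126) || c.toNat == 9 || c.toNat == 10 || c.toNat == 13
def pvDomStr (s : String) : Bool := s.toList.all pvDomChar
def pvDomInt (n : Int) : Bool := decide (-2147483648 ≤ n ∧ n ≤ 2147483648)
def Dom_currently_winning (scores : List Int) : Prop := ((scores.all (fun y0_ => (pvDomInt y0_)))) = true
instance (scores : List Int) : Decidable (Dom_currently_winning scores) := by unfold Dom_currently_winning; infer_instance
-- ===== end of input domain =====

-- B is simpler: one pass with running even/odd totals emitting each verdict at once,
-- instead of A's build-two-prefix-sum-lists loop followed by a second comparison loop.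

-- ===== PORT A =====
-- first loop: for i in range(len(scores)): accumulate even/odd and append to evenlst/oddlst
def cwStepA (st : Int × Int × List Int × List Int) (p : Int × Int) :
    Int × Int × List Int × List Int :=
  if p.1 % 2 == 0 then
    (st.1 + p.2, st.2.1, st.2.2.1 ++ [st.1 + p.2], st.2.2.2)
  else
    (st.1, st.2.1 + p.2, st.2.2.1, st.2.2.2 ++ [st.2.1 + p.2])

def currently_winning (scores : List Int) : List String :=
  -- 'for i in range(len(scores)): … scores[i] …' iterates exactly the index/value pairs
  let st := (PySem.List.enumerate scores 0).foldl cwStepA (0, 0, [], [])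
  let evenlst := st.2.2.1
  let oddlst := st.2.2.2
  (PySem.List.pyRange 0 oddlst.length 1).foldl
    (fun lst3 i =>
      if PySem.List.pyGetD evenlst i 0 > PySem.List.pyGetD oddlst i 0 then lst3 ++ ["Y"]
      else if PySem.List.pyGetD evenlst i 0 == PySem.List.pyGetD oddlst i 0 then lst3 ++ ["T"]
      else lst3 ++ ["O"]) []

-- ===== PORT B =====
def cwStepB (st : Int × Int × List String) (p : Int × Int) : Int × Int × List String :=
  if p.1 % 2 == 0 then
    (st.1 + p.2, st.2.1, st.2.2)
  else
    (st.1, st.2.1 + p.2,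
      st.2.2 ++ [if st.1 > st.2.1 + p.2 then "Y"
                 else if st.1 == st.2.1 + p.2 then "T" else "O"])

def currently_winning_alt (scores : List Int) : List String :=
  ((PySem.List.enumerate scores 0).foldl cwStepB (0, 0, [])).2.2

-- ===== PRECONDITION & SPEC =====
def Spec_currently_winning (scores : List Int) (out : List String) : Prop := out = currently_winning_alt scores
instance (scores : List Int) (out : List String) : Decidable (Spec_currently_winning scores out) := by unfold Spec_currently_winning; infer_instance

-- ===== CLAIM (what is proved, stated in full; the proofs are below) =====
def Claim_equal_currently_winning : Prop := ∀ (scores : List Int), Dom_currently_winning scores → Spec_currently_winning scores (currently_winning scores)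

-- ===== LEMMAS AND PROOFS =====

-- verdict for one even/odd total pair
def cwCmp (e o : Int) : String := if e > o then "Y" else if e == o then "T" else "O"

-- reference: consume the scores two at a time
def cwPairs : Int → Int → List Int → List String
  | e, o, a :: b :: rest => cwCmp (e + a) (o + b) :: cwPairs (e + a) (o + b) rest
  | _, _, _ => []

-- prefix-sum lists A builds, two at a time
def cwSums : Int → Int → List Int → List Int × List Int
  | e, o, a :: b :: rest =>
      let r := cwSums (e + a) (o + b) rest
      ((e + a) :: r.1, (o + b) :: r.2)
  | e, _, [a] => ([e + a], [])
  | _, _, [] => ([], [])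

-- two-at-a-time induction principle on lists
def cwTwoStep {α : Type} {P : List α → Prop} (h0 : P []) (h1 : ∀ a, P [a])
    (h2 : ∀ a b l, P l → P (a :: b :: l)) : ∀ l, P l
  | [] => h0
  | [a] => h1 a
  | a :: b :: l => h2 a b l (cwTwoStep h0 h1 h2 l)

theorem cwB_go (xs : List Int) : ∀ (k : Int) (e o : Int) (acc : List String),
    ((PySem.List.enumerate xs (2 * k)).foldl cwStepB (e, o, acc)).2.2 =
      acc ++ cwPairs e o xs := by
  induction xs using cwTwoStep with
  | h0 => intro k e o acc; simp [PySem.List.enumerate, cwPairs]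
  | h1 a =>
      intro k e o acc
      simp [PySem.List.enumerate, cwStepB, cwPairs, Int.mul_emod_right]
  | h2 a b l ih =>
      intro k e o acc
      have h2k : (2 * k + 1) % 2 ≠ 0 := by omega
      have : 2 * k + 1 + 1 = 2 * (k + 1) := by ring
      simp [PySem.List.enumerate, cwStepB, Int.mul_emod_right, this,
        ih (k + 1), cwPairs, cwCmp]

theorem cwA_go (xs : List Int) : ∀ (k : Int) (e o : Int) (el ol : List Int),
    (((PySem.List.enumerate xs (2 * k)).foldl cwStepA (e, o, el, ol)).2.2.1,
     ((PySem.List.enumerate xs (2 * k)).foldl cwStepA (e, o, el, ol)).2.2.2) =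
      (el ++ (cwSums e o xs).1, ol ++ (cwSums e o xs).2) := by
  induction xs using cwTwoStep with
  | h0 => intro k e o el ol; simp [PySem.List.enumerate, cwSums]
  | h1 a =>
      intro k e o el ol
      simp [PySem.List.enumerate, cwStepA, cwSums, Int.mul_emod_right]
  | h2 a b l ih =>
      intro k e o el ol
      have h2k : (2 * k + 1) % 2 ≠ 0 := by omega
      have : 2 * k + 1 + 1 = 2 * (k + 1) := by ring
      have hih := ih (k + 1) (e + a) (o + b) (el ++ [e + a]) (ol ++ [o + b])
      simp [PySem.List.enumerate, cwStepA, Int.mul_emod_right, this, cwSums] at hih ⊢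
      exact hih

theorem cwSums_len (xs : List Int) : ∀ (e o : Int),
    (cwSums e o xs).2.length ≤ (cwSums e o xs).1.length ∧
    (cwSums e o xs).1.length ≤ (cwSums e o xs).2.length + 1 := by
  induction xs using cwTwoStep with
  | h0 => intro e o; simp [cwSums]
  | h1 a => intro e o; simp [cwSums]
  | h2 a b l ih => intro e o; simpa [cwSums] using ih (e + a) (o + b)

theorem cwZip_sums (xs : List Int) : ∀ (e o : Int),
    List.zipWith cwCmp (cwSums e o xs).1 (cwSums e o xs).2 = cwPairs e o xs := by
  induction xs using cwTwoStep with
  | h0 => intro e o; simp [cwSums, cwPairs]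
  | h1 a => intro e o; simp [cwSums, cwPairs]
  | h2 a b l ih => intro e o; simp [cwSums, cwPairs, ih (e + a) (o + b)]

-- the index-comparison second loop of A is zipWith cwCmp (truncated at oddlst's length)
theorem cwSecond_loop (E O : List Int) (h : O.length ≤ E.length) :
    (PySem.List.pyRange 0 O.length 1).foldl
      (fun lst3 i =>
        if PySem.List.pyGetD E i 0 > PySem.List.pyGetD O i 0 then lst3 ++ ["Y"]
        else if PySem.List.pyGetD E i 0 == PySem.List.pyGetD O i 0 then lst3 ++ ["T"]
        else lst3 ++ ["O"]) [] = List.zipWith cwCmp E O := by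
  have hmap : (PySem.List.pyRange 0 O.length 1).foldl
      (fun lst3 i =>
        if PySem.List.pyGetD E i 0 > PySem.List.pyGetD O i 0 then lst3 ++ ["Y"]
        else if PySem.List.pyGetD E i 0 == PySem.List.pyGetD O i 0 then lst3 ++ ["T"]
        else lst3 ++ ["O"]) [] =
      (PySem.List.pyRange 0 O.length 1).map
        (fun i => cwCmp (PySem.List.pyGetD E i 0) (PySem.List.pyGetD O i 0)) := by
    have hbody : (fun (lst3 : List String) (i : Int) =>
        if PySem.List.pyGetD E i 0 > PySem.List.pyGetD O i 0 then lst3 ++ ["Y"]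
        else if PySem.List.pyGetD E i 0 == PySem.List.pyGetD O i 0 then lst3 ++ ["T"]
        else lst3 ++ ["O"]) =
        (fun lst3 i => lst3 ++ [cwCmp (PySem.List.pyGetD E i 0) (PySem.List.pyGetD O i 0)]) := by
      funext lst3 i; simp only [cwCmp]; split_ifs <;> rfl
    rw [hbody, PySem.List.foldl_append_singleton_eq_map, List.nil_append]
  rw [hmap]
  apply List.ext_getElem
  · simp [PySem.List.length_pyRange_one]; omega
  · intro n h1 h2
    have hn : n < O.length := by
      simpa [PySem.List.length_pyRange_one] using h1
    simp [PySem.List.getElem_pyRange_one, cwCmp,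
      List.getElem?_eq_getElem hn, List.getElem?_eq_getElem (lt_of_lt_of_le hn h)]

-- ===== VERDICT (by name: the statement is the Claim_ definition above) =====
theorem currently_winning_spec : Claim_equal_currently_winning := by
  intro scores _
  unfold Spec_currently_winning currently_winning currently_winning_alt
  have hA := cwA_go scores 0 0 0 [] []
  have hB := cwB_go scores 0 0 0 []
  simp only [mul_zero] at hA hB
  have h1 : ((PySem.List.enumerate scores 0).foldl cwStepA (0, 0, [], [])).2.2.1
      = (cwSums 0 0 scores).1 := by
    have := congrArg Prod.fst hA; simpa using this
  have h2 : ((PySem.List.enumerate scores 0).foldl cwStepA (0, 0, [], [])).2.2.2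
      = (cwSums 0 0 scores).2 := by
    have := congrArg Prod.snd hA; simpa using this
  simp only [h1, h2, hB, List.nil_append]
  rw [cwSecond_loop _ _ (cwSums_len scores 0 0).1, cwZip_sums]
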